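-- pv_equiv track=rewrite | github.com/wolabal/dartlab | experiments/022_boardOfDirectors/step01_explore.py | extractTableBlocks
-- ===== SOURCE A (Python) =====
-- def extractTableBlocks(content: str) -> list[list[str]]:
--     """파이프라인 테이블 블록 추출."""
--     lines = content.split("\n")
--     blocks: list[list[str]] = []
--     current: list[str] = []
--     for line in lines:
--         if line.strip().startswith("|"):
--             current.append(line)
--         else:
--             if current:
--                 blocks.append(current)
--                 current = []
--     if current:
--         blocks.append(current)
--     return blocks
-- ===== SOURCE B (Python) =====
-- def extractTableBlocks(content: str) -> list[list[str]]:
--     """Pipe-table block extraction via run spans: scan each maximal run of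
--     same-keyed lines with an inner index advance and keep the True runs."""
--     lines = content.split("\n")
--
--     def key(line: str) -> bool:
--         return line.strip().startswith("|")
--
--     blocks: list[list[str]] = []
--     n = len(lines)
--     i = 0
--     while i < n:
--         k = key(lines[i])
--         j = i + 1
--         while j < n and key(lines[j]) == k:
--             j += 1
--         if k:
--             blocks.append(lines[i:j])
--         i = j
--     return blocks
-- ===== Notes on version B (the rewrite author's own statement) =====
-- stated objective: alternative
-- what changed: Replaces A's accumulator-and-flush state machine (append to current, flush on non-table line and again after the loop) with a groupby-style run scan: two indices delimit each maximal run of equally-keyed lines and only True runs are sliced out, so no pending-block state or trailing flush exists.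
import Mathlib
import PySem

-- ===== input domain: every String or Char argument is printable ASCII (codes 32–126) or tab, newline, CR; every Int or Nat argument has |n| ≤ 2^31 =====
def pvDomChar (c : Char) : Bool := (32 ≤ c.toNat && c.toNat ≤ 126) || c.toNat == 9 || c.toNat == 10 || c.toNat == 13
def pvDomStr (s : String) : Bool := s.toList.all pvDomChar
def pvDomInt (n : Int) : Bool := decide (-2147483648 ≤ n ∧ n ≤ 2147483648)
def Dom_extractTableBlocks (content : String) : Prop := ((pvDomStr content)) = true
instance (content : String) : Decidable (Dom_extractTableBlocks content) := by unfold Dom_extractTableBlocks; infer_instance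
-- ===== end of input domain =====

-- B replaces A's accumulator-and-flush state machine with a groupby-style run scan
-- (delimit each maximal run of equally-keyed lines, keep the True runs); alternative, same cost.

-- the shared line test: line.strip().startswith("|")
def pvKey (line : String) : Bool := PySem.Str.startswith (PySem.Str.strip line) "|"

-- ===== PORT A =====
def extractTableBlocks (content : String) : List (List String) :=
  let lines := ((PySem.Str.split? content "\n").getD [])
  let st := lines.foldl
    (fun (s : List (List String) × List String) line =>
      if pvKey line then (s.1, s.2 ++ [line])
      else if s.2 ≠ [] then (s.1 ++ [s.2], ([] : List String)) else s)
    ([], [])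
  if st.2 ≠ [] then st.1 ++ [st.2] else st.1

-- ===== PORT B =====
-- the outer while loop of Source B: each step consumes one maximal run (the inner while
-- loop = takeWhile/dropWhile of the same-key span) and keeps it iff its key is True
def pvRuns : List String → List (List String)
  | [] => []
  | l :: ls =>
    if pvKey l then (l :: ls.takeWhile pvKey) :: pvRuns (ls.dropWhile pvKey)
    else pvRuns (ls.dropWhile (fun x => !pvKey x))
termination_by ls => ls.length
decreasing_by
  · exact Nat.lt_succ_of_le (ls.length_dropWhile_le pvKey)
  · exact Nat.lt_succ_of_le (ls.length_dropWhile_le _)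

def extractTableBlocks_alt (content : String) : List (List String) :=
  pvRuns (((PySem.Str.split? content "\n").getD []))

-- ===== PRECONDITION & SPEC =====
def Spec_extractTableBlocks (content : String) (out : List (List String)) : Prop := out = extractTableBlocks_alt content
instance (content : String) (out : List (List String)) : Decidable (Spec_extractTableBlocks content out) := by unfold Spec_extractTableBlocks; infer_instance

-- ===== CLAIM (what is proved, stated in full; the proofs are below) =====
def Claim_equal_extractTableBlocks : Prop := ∀ (content : String), Dom_extractTableBlocks content → Spec_extractTableBlocks content (extractTableBlocks content)

-- ===== LEMMAS AND PROOFS =====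

-- A's loop body and trailing flush, named for the proofs
def pvStep (s : List (List String) × List String) (line : String) :
    List (List String) × List String :=
  if pvKey line then (s.1, s.2 ++ [line])
  else if s.2 ≠ [] then (s.1 ++ [s.2], ([] : List String)) else s

def pvFinish (st : List (List String) × List String) : List (List String) :=
  if st.2 ≠ [] then st.1 ++ [st.2] else st.1

-- A's algorithm written as structural recursion over the lines, carrying the pending block
def pvAux (cur : List String) : List String → List (List String)
  | [] => if cur = [] then [] else [cur]
  | l :: ls =>
    if pvKey l then pvAux (cur ++ [l]) ls
    else (if cur = [] then [] else [cur]) ++ pvAux [] ls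

lemma pvRuns_nil : pvRuns [] = [] := by rw [pvRuns]

lemma pvRuns_cons_true {l : String} {ls : List String} (h : pvKey l = true) :
    pvRuns (l :: ls) = (l :: ls.takeWhile pvKey) :: pvRuns (ls.dropWhile pvKey) := by
  rw [pvRuns]; simp [h]

lemma pvRuns_cons_false {l : String} {ls : List String} (h : pvKey l = false) :
    pvRuns (l :: ls) = pvRuns (ls.dropWhile (fun x => !pvKey x)) := by
  rw [pvRuns]; simp [h]

lemma pvRuns_dropFalse (ls : List String) :
    pvRuns (ls.dropWhile (fun x => !pvKey x)) = pvRuns ls := by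
  induction ls with
  | nil => rfl
  | cons l ls ih =>
    rcases hb : pvKey l with _ | _
    · rw [List.dropWhile_cons, if_pos (by simp [hb]), ih, pvRuns_cons_false hb, ih]
    · rw [List.dropWhile_cons, if_neg (by simp [hb])]

lemma pvAux_eq (ls : List String) :
    (pvAux [] ls = pvRuns ls) ∧
    (∀ cur : List String, cur ≠ [] →
      pvAux cur ls = (cur ++ ls.takeWhile pvKey) :: pvRuns (ls.dropWhile pvKey)) := by
  induction ls with
  | nil =>
    refine ⟨by simp [pvAux, pvRuns_nil], fun cur hc => by simp [pvAux, pvRuns_nil, hc]⟩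
  | cons l ls ih =>
    rcases hb : pvKey l with _ | _
    · have hruns : pvRuns (l :: ls) = pvRuns ls := by
        rw [pvRuns_cons_false hb, pvRuns_dropFalse]
      constructor
      · rw [pvAux, if_neg (by simp [hb]), hruns]
        simp [ih.1]
      · intro cur hc
        rw [pvAux, if_neg (by simp [hb]), if_neg hc, List.takeWhile_cons,
          List.dropWhile_cons, if_neg (by simp [hb]), if_neg (by simp [hb]),
          ih.1, hruns]
        simp
    · constructor
      · rw [pvAux, if_pos (by simp [hb]), List.nil_append,
          ih.2 [l] (by simp), pvRuns_cons_true hb]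
        simp
      · intro cur hc
        rw [pvAux, if_pos (by simp [hb]), ih.2 (cur ++ [l]) (by simp),
          List.takeWhile_cons, if_pos (by simp [hb]), List.dropWhile_cons,
          if_pos (by simp [hb])]
        simp

lemma pvFold_eq (ls : List String) :
    ∀ (blocks : List (List String)) (cur : List String),
      pvFinish (ls.foldl pvStep (blocks, cur)) = blocks ++ pvAux cur ls := by
  induction ls with
  | nil =>
    intro blocks cur
    by_cases hc : cur = [] <;> simp [pvAux, pvFinish, hc]
  | cons l ls ih =>
    intro blocks cur
    rcases hb : pvKey l with _ | _
    · by_cases hc : cur = []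
      · rw [List.foldl_cons, show pvStep (blocks, cur) l = (blocks, cur) from by
          simp [pvStep, hb, hc], ih blocks cur, pvAux, if_neg (by simp [hb]), hc]
        simp
      · rw [List.foldl_cons, show pvStep (blocks, cur) l = (blocks ++ [cur], []) from by
          simp [pvStep, hb, hc], ih (blocks ++ [cur]) [], pvAux, if_neg (by simp [hb]),
          if_neg hc]
        simp
    · rw [List.foldl_cons, show pvStep (blocks, cur) l = (blocks, cur ++ [l]) from by
        simp [pvStep, hb], ih blocks (cur ++ [l]), pvAux, if_pos (by simp [hb])]

-- ===== VERDICT (by name: the statement is the Claim_ definition above) =====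
theorem extractTableBlocks_spec : Claim_equal_extractTableBlocks := by
  intro content _
  unfold Spec_extractTableBlocks extractTableBlocks extractTableBlocks_alt
  show pvFinish (((PySem.Str.split? content "\n").getD []).foldl pvStep ([], [])) = _
  rw [pvFold_eq _ [] [], (pvAux_eq _).1]
  simp
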